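-- pv_equiv track=rewrite | github.com/Jaehyeon1020/ps-study | 프로그래머스/unrated/132267. 콜라 문제/콜라 문제.py | solution
-- ===== SOURCE A (Python) =====
-- def solution(a, b, n):
--     answer = 0
--
--     while n >= a:
--         given = n // a
--         n -= a * given
--         n += given * b
--         answer += given * b
--
--     return answer
-- ===== SOURCE B (Python) =====
-- def solution(a, b, n):
--     if n < a:
--         return 0
--     return (n - b) // (a - b) * b
-- ===== Notes on version B (the rewrite author's own statement) =====
-- stated objective: simpler
-- what changed: Replaces the repeated exchange loop with the closed form (n-b)//(a-b)*b (0 when n < a).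
-- outside the precondition, e.g. on solution(3, -5, 6): A returns -10, B returns -5
import Mathlib
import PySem

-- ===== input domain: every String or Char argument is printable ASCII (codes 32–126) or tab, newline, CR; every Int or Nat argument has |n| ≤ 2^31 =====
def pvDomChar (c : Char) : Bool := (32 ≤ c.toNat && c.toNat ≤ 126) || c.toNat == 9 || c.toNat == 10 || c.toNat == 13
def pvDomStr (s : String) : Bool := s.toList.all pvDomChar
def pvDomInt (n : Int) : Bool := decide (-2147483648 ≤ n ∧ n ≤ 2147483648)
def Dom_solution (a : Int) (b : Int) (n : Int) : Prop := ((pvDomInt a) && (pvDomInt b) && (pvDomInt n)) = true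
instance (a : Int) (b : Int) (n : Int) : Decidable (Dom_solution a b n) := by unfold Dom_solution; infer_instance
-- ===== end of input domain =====

-- B replaces A's repeated-exchange loop by the closed form (n-b)//(a-b)*b (0 when n < a): simpler, a two-line formula instead of a loop.


-- ===== PORT A =====
-- A's while-loop made total by fuel; the generous fuel n.toNat + a.natAbs + b.natAbs + 1 covers every terminating run (under Pre_, n.toNat alone already bounds the iterations)
def solutionLoop (a : Int) (b : Int) : Nat → Int → Int → Int
  | 0, _, answer => answer
  | fuel + 1, n, answer =>
    if a ≤ n then
      let given := PySem.Int.floordiv n a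
      solutionLoop a b fuel (n - a * given + given * b) (answer + given * b)
    else answer

def solution (a : Int) (b : Int) (n : Int) : Int :=
  solutionLoop a b (n.toNat + a.natAbs + b.natAbs + 1) n 0

-- ===== PORT B =====
def solution_alt (a : Int) (b : Int) (n : Int) : Int :=
  if n < a then 0 else PySem.Int.floordiv (n - b) (a - b) * b

-- ===== PRECONDITION & SPEC =====
-- Pre_ restricts to the problem's natural domain (0 ≤ b < a, plus all inputs with n < a, where
-- A returns 0 immediately): outside it, for n ≥ a, A diverges (b ≥ a), raises ZeroDivisionError
-- (a = 0), or returns values for negative b/a outside the problem's stated domain 1 ≤ b < a.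
def Pre_solution (a : Int) (b : Int) (n : Int) : Prop := n < a ∨ (0 ≤ b ∧ b < a)
instance (a : Int) (b : Int) (n : Int) : Decidable (Pre_solution a b n) := by unfold Pre_solution; infer_instance
def pvWitness_solution : Int × Int × Int := (3, 1, 10)
def Spec_solution (a : Int) (b : Int) (n : Int) (out : Int) : Prop := out = solution_alt a b n
instance (a : Int) (b : Int) (n : Int) (out : Int) : Decidable (Spec_solution a b n out) := by unfold Spec_solution; infer_instance

-- ===== CLAIM (what is proved, stated in full; the proofs are below) =====
def Claim_equal_solution : Prop := ∀ (a : Int) (b : Int) (n : Int), Dom_solution a b n → Pre_solution a b n → Spec_solution a b n (solution a b n)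

-- ===== LEMMAS AND PROOFS =====

-- Loop invariant: with 0 ≤ b < a and enough fuel, the loop adds the closed form to the accumulator.
lemma solutionLoop_eq (a b : Int) (hb : 0 ≤ b) (hba : b < a) :
    ∀ (fuel : Nat) (n answer : Int), n.toNat ≤ fuel →
      solutionLoop a b fuel n answer =
        answer + (if a ≤ n then PySem.Int.floordiv (n - b) (a - b) * b else 0) := by
  intro fuel
  induction fuel with
  | zero =>
    intro n answer hn
    have hna : ¬ a ≤ n := by omega
    simp [solutionLoop, hna]
  | succ fuel ih =>
    intro n answer hn
    by_cases hna : a ≤ n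
    · have ha : (0:Int) < a := by omega
      have hab : (0:Int) < a - b := by omega
      set q := PySem.Int.floordiv n a with hq
      have hqe : q = n / a := by rw [hq, PySem.Int.floordiv_eq_ediv_of_pos ha]
      have hq1 : 1 ≤ q := by
        rw [hqe]
        calc (1:Int) = a / a := by rw [Int.ediv_self (by omega)]
        _ ≤ n / a := Int.ediv_le_ediv ha hna
      have hrl : 0 ≤ n - a * q := by
        rw [hqe]; have := Int.emod_nonneg n (by omega : a ≠ 0)
        rw [Int.emod_def] at this; linarith
      have hru : n - a * q < a := by
        rw [hqe]; have := Int.emod_lt_of_pos n ha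
        rw [Int.emod_def] at this; linarith
      set n' := n - a * q + q * b with hn'
      have hdec : n' < n := by
        have : 1 * (a - b) ≤ q * (a - b) := by
          apply mul_le_mul_of_nonneg_right hq1 (le_of_lt hab)
        nlinarith
      have hfuel : n'.toNat ≤ fuel := by omega
      have hdiv : PySem.Int.floordiv (n - b) (a - b) = PySem.Int.floordiv (n' - b) (a - b) + q := by
        rw [PySem.Int.floordiv_eq_ediv_of_pos hab, PySem.Int.floordiv_eq_ediv_of_pos hab]
        have hsplit : n - b = (n' - b) + q * (a - b) := by ring
        rw [hsplit, Int.add_mul_ediv_right _ _ (by omega : a - b ≠ 0)]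
      have hnb' : 0 ≤ n' - b := by
        have : 0 ≤ (q - 1) * b := mul_nonneg (by omega) hb
        nlinarith
      rw [solutionLoop]
      simp only [hna, if_true]
      rw [ih _ _ hfuel]
      by_cases hna' : a ≤ n'
      · simp only [hna', if_true, hdiv]; ring
      · have hz : PySem.Int.floordiv (n' - b) (a - b) = 0 := by
          rw [PySem.Int.floordiv_eq_ediv_of_pos hab]
          exact Int.ediv_eq_zero_of_lt hnb' (by omega)
        simp only [hna', if_false, hdiv, hz]; ring
    · simp [solutionLoop, hna]

-- ===== VERDICT (by name: the statement is the Claim_ definition above) =====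
theorem solution_spec : Claim_equal_solution := by
  intro a b n _ hpre
  unfold Spec_solution solution solution_alt
  rcases hpre with h | ⟨hb, hba⟩
  · have hna : ¬ a ≤ n := by omega
    simp [solutionLoop, hna, h]
  · rw [solutionLoop_eq a b hb hba (n.toNat + a.natAbs + b.natAbs + 1) n 0 (by omega)]
    by_cases hna : a ≤ n
    · simp [hna, not_lt.mpr hna]
    · simp [hna, lt_of_not_ge hna]
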